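-- pv_equiv track=rewrite | github.com/Barahona1602/Interpete-de-generacion-de-paginas | analizador.py | quitar
-- ===== SOURCE A (Python) =====
-- def quitar(entrada:str, token:str):
--     nueva_cadena = ""
--     count_1 = 0
--     lista = entrada.split(token)
--     for j in lista:
--         if count_1 == len(lista) - 1:
--             nueva_cadena += j
--         elif count_1 > 0:
--             nueva_cadena += j + token
--
--         count_1 += 1
--     return nueva_cadena
-- ===== SOURCE B (Python) =====
-- def quitar(entrada: str, token: str):
--     idx = entrada.find(token)
--     if idx == -1:
--         return entrada
--     return entrada[idx + len(token):]
-- ===== Notes on version B (the rewrite author's own statement) =====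
-- stated objective: simpler
-- what changed: B replaces A's full split into a parts list plus an index-counting loop that rejoins the tail with the token by a single find of the first occurrence and one slice of everything after it; no loop, no reconstruction.
import Mathlib
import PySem

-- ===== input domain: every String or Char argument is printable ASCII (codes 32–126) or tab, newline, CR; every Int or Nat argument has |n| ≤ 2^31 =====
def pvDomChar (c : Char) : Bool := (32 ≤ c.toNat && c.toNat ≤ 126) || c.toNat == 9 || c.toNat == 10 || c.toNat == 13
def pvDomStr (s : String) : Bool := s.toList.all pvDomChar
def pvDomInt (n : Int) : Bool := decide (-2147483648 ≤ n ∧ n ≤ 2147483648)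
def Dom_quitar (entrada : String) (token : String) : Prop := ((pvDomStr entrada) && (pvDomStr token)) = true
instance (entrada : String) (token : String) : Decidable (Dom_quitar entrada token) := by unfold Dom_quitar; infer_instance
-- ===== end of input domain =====

-- B replaces A's full split + reassembly loop by a single find of the first token
-- occurrence and one slice; objective: simpler.

-- ===== PORT A =====
-- the for-loop over `lista` with accumulator (nueva_cadena, count_1), referencing len(lista)
def quitarFold (t : List Char) (lista : List (List Char)) : List Char :=
  (lista.foldl (fun (st : List Char × Int) j =>
      ( if st.2 = (lista.length : Int) - 1 then st.1 ++ j
        else if 0 < st.2 then st.1 ++ j ++ t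
        else st.1,
        st.2 + 1)) ([], 0)).1

def quitar (entrada : String) (token : String) : String :=
  match PySem.Chars.split? entrada.toList token.toList with
  | none => ""          -- token = "": Python raises ValueError here; excluded by Pre_quitar
  | some lista => String.ofList (quitarFold token.toList lista)

-- ===== PORT B =====
def quitar_alt (entrada : String) (token : String) : String :=
  let idx := PySem.Str.find entrada token
  if idx = -1 then entrada
  else String.ofList (PySem.List.slice entrada.toList (some (idx + (token.toList.length : Int))) none)

-- ===== PRECONDITION & SPEC =====
-- Pre_ excludes only token = "", where Python A raises ValueError ('empty separator').
def Pre_quitar (entrada : String) (token : String) : Prop := token ≠ ""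
instance (entrada : String) (token : String) : Decidable (Pre_quitar entrada token) := by unfold Pre_quitar; infer_instance
def pvWitness_quitar : String × String := ("a,b,c", ",")

def Spec_quitar (entrada : String) (token : String) (out : String) : Prop := out = quitar_alt entrada token
instance (entrada : String) (token : String) (out : String) : Decidable (Spec_quitar entrada token out) := by unfold Spec_quitar; infer_instance

-- ===== CLAIM (what is proved, stated in full; the proofs are below) =====
def Claim_equal_quitar : Prop := ∀ (entrada : String) (token : String), Dom_quitar entrada token → Pre_quitar entrada token → Spec_quitar entrada token (quitar entrada token)

-- ===== LEMMAS AND PROOFS =====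

-- fuel-indexed, accumulator-free mirror of PySem.Chars.splitOn.go
def sp (sep : List Char) : Nat → List Char → List (List Char)
  | 0, l => [l]
  | _ + 1, [] => [[]]
  | f + 1, c :: rest =>
      if sep.isPrefixOf (c :: rest) then
        [] :: sp sep f ((c :: rest).drop sep.length)
      else
        (sp sep f rest).modifyHead (c :: ·)

theorem sp_ne_nil (sep : List Char) (fuel : Nat) (l : List Char) : sp sep fuel l ≠ [] := by
  induction fuel generalizing l with
  | zero => simp [sp]
  | succ f ih =>
    cases l with
    | nil => simp [sp]
    | cons c rest =>
      simp only [sp]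
      split
      · simp
      · cases h : sp sep f rest with
        | nil => exact absurd h (ih rest)
        | cons a b => simp

theorem go_eq_sp (sep : List Char) (fuel : Nat) (l cur : List Char) (acc : List (List Char)) :
    PySem.Chars.splitOn.go sep fuel l cur acc
      = acc.reverse ++ (sp sep fuel l).modifyHead (cur.reverse ++ ·) := by
  induction fuel generalizing l cur acc with
  | zero => simp [PySem.Chars.splitOn.go, sp]
  | succ f ih =>
    cases l with
    | nil => simp [PySem.Chars.splitOn.go, sp]
    | cons c rest =>
      rw [PySem.Chars.splitOn.go]
      by_cases hp : sep.isPrefixOf (c :: rest)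
      · simp only [hp, if_true, sp]
        rw [ih]
        cases h2 : sp sep f ((c :: rest).drop sep.length) with
        | nil => exact absurd h2 (sp_ne_nil sep f _)
        | cons a b => simp [h2, List.modifyHead]
      · simp only [hp, if_false, sp, Bool.false_eq_true]
        rw [ih]
        cases h : sp sep f rest with
        | nil => exact absurd h (sp_ne_nil sep f rest)
        | cons a b => simp [h, List.modifyHead]

theorem splitOn_eq_sp (l sep : List Char) :
    PySem.Chars.splitOn l sep = sp sep (l.length + 1) l := by
  rw [PySem.Chars.splitOn, go_eq_sp]
  cases h : sp sep (l.length + 1) l with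
  | nil => exact absurd h (sp_ne_nil sep _ l)
  | cons a b => simp [List.modifyHead]

theorem sp_fuel_irrel (sep : List Char) (hsep : sep ≠ []) :
    ∀ (f f' : Nat) (l : List Char), l.length ≤ f → l.length ≤ f' → sp sep f l = sp sep f' l := by
  intro f
  induction f with
  | zero =>
    intro f' l h _
    have : l = [] := List.eq_nil_of_length_eq_zero (Nat.le_zero.mp h)
    subst this
    cases f' <;> simp [sp]
  | succ f ih =>
    intro f' l h h'
    cases l with
    | nil => cases f' <;> simp [sp]
    | cons c rest =>
      cases f' with
      | zero => simp at h'
      | succ f₁ =>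
        simp only [sp]
        by_cases hp : sep.isPrefixOf (c :: rest)
        · simp only [hp, if_true]
          have hk : 1 ≤ sep.length := by
            cases sep with
            | nil => exact absurd rfl hsep
            | cons a b => simp
          have hlen : ((c :: rest).drop sep.length).length ≤ f := by
            simp only [List.length_drop, List.length_cons]
            simp only [List.length_cons] at h
            omega
          have hlen' : ((c :: rest).drop sep.length).length ≤ f₁ := by
            simp only [List.length_drop, List.length_cons]
            simp only [List.length_cons] at h'
            omega
          rw [ih _ _ hlen hlen']
        · simp only [hp, if_false, Bool.false_eq_true]
          have hlen : rest.length ≤ f := by simp only [List.length_cons] at h; omega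
          have hlen' : rest.length ≤ f₁ := by simp only [List.length_cons] at h'; omega
          rw [ih _ _ hlen hlen']

theorem join_sp (sep : List Char) (hsep : sep ≠ []) :
    ∀ (f : Nat) (l : List Char), l.length ≤ f → PySem.Chars.join sep (sp sep f l) = l := by
  intro f
  induction f with
  | zero =>
    intro l h
    have : l = [] := List.eq_nil_of_length_eq_zero (Nat.le_zero.mp h)
    subst this
    simp [sp, PySem.Chars.join_singleton]
  | succ f ih =>
    intro l h
    cases l with
    | nil => simp [sp, PySem.Chars.join_singleton]
    | cons c rest =>
      simp only [sp]
      by_cases hp : sep.isPrefixOf (c :: rest)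
      · simp only [hp, if_true]
        have hpre : sep <+: c :: rest := List.isPrefixOf_iff_prefix.mp hp
        have hk : 1 ≤ sep.length := by
          cases sep with
          | nil => exact absurd rfl hsep
          | cons a b => simp
        have hlen : ((c :: rest).drop sep.length).length ≤ f := by
          simp only [List.length_drop, List.length_cons]
          simp only [List.length_cons] at h
          omega
        cases hsp : sp sep f ((c :: rest).drop sep.length) with
        | nil => exact absurd hsp (sp_ne_nil sep f _)
        | cons a b =>
          rw [PySem.Chars.join_cons_cons, ← hsp, ih _ hlen]
          simp only [List.nil_append]
          exact List.prefix_iff_eq_append.mp hpre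

      · simp only [hp, if_false, Bool.false_eq_true]
        have hlen : rest.length ≤ f := by simp only [List.length_cons] at h; omega
        cases hsp : sp sep f rest with
        | nil => exact absurd hsp (sp_ne_nil sep f rest)
        | cons a b =>
          simp only [List.modifyHead]
          cases b with
          | nil =>
            rw [PySem.Chars.join_singleton]
            have := ih rest hlen
            rw [hsp, PySem.Chars.join_singleton] at this
            rw [this]
          | cons q bs =>
            rw [PySem.Chars.join_cons_cons]
            have := ih rest hlen
            rw [hsp, PySem.Chars.join_cons_cons] at this
            simp only [List.cons_append, List.append_assoc] at this ⊢
            rw [this]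

theorem splitOn_of_not_infix (l sep : List Char) (hsep : sep ≠ []) (h : ¬ sep <:+: l) :
    PySem.Chars.splitOn l sep = [l] := by
  rw [splitOn_eq_sp]
  have : ∀ (f : Nat) (m : List Char), ¬ sep <:+: m → sp sep f m = [m] := by
    intro f
    induction f with
    | zero => intro m _; simp [sp]
    | succ f ih =>
      intro m hm
      cases m with
      | nil => simp [sp]
      | cons c rest =>
        simp only [sp]
        have hp : sep.isPrefixOf (c :: rest) = false := by
          by_contra hc
          exact hm ((List.isPrefixOf_iff_prefix.mp (by simpa using hc)).isInfix)
        simp only [hp, Bool.false_eq_true, if_false]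
        have : ¬ sep <:+: rest := fun hi => hm (hi.trans (List.suffix_cons c rest).isInfix)
        rw [ih rest this]
        simp [List.modifyHead]
  exact this _ l h

theorem splitOn_first_occ (sep : List Char) (hsep : sep ≠ []) :
    ∀ (i : Nat) (l : List Char), i ≤ l.length → sep <+: l.drop i →
      (∀ j, j < i → ¬ sep <+: l.drop j) →
      PySem.Chars.splitOn l sep
        = l.take i :: PySem.Chars.splitOn (l.drop (i + sep.length)) sep := by
  intro i
  induction i with
  | zero =>
    intro l _ hpre _
    cases l with
    | nil =>
      simp only [List.drop_nil] at hpre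
      have : sep = [] := List.prefix_nil.mp hpre
      exact absurd this hsep
    | cons c rest =>
      rw [splitOn_eq_sp]
      simp only [List.drop_zero] at hpre
      have hp : sep.isPrefixOf (c :: rest) = true := List.isPrefixOf_iff_prefix.mpr hpre
      simp only [sp, hp, if_true, List.take_zero, Nat.zero_add]
      congr 1
      rw [splitOn_eq_sp]
      have hk : 1 ≤ sep.length := by
        cases sep with
        | nil => exact absurd rfl hsep
        | cons a b => simp
      apply sp_fuel_irrel sep hsep
      · simp only [List.length_drop, List.length_cons]; omega
      · omega
  | succ i ih =>
    intro l hlen hpre hmin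
    cases l with
    | nil => simp at hlen
    | cons c rest =>
      have hnp : ¬ sep <+: (c :: rest) := by
        have := hmin 0 (Nat.succ_pos i)
        simpa using this
      have hp : sep.isPrefixOf (c :: rest) = false := by
        by_contra hc
        exact hnp (List.isPrefixOf_iff_prefix.mp (by simpa using hc))
      rw [splitOn_eq_sp]
      simp only [sp, hp, Bool.false_eq_true, if_false]
      have hrest : PySem.Chars.splitOn rest sep
          = rest.take i :: PySem.Chars.splitOn (rest.drop (i + sep.length)) sep := by
        apply ih
        · simp only [List.length_cons] at hlen; omega
        · simpa using hpre
        · intro j hj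
          have := hmin (j + 1) (by omega)
          simpa using this
      rw [splitOn_eq_sp] at hrest
      have : sp sep rest.length rest = sp sep (rest.length + 1) rest :=
        sp_fuel_irrel sep hsep _ _ rest (le_refl _) (Nat.le_succ _)
      have hlc : (c :: rest).length = rest.length + 1 := by simp
      rw [show sp sep ((c :: rest).length) rest = sp sep (rest.length + 1) rest from by rw [hlc]]
      rw [hrest, show i + 1 + sep.length = (i + sep.length) + 1 from by omega]
      simp [List.modifyHead, ← splitOn_eq_sp]

-- A's loop: on a nonempty parts list it returns the head if it is alone, else the tail rejoined
theorem quitarFold_invariant (t : List Char) (n : Int) :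
    ∀ (ys : List (List Char)) (acc : List Char) (c : Int),
      c + ys.length = n → 0 < c →
      (ys.foldl (fun (st : List Char × Int) j =>
        ( if st.2 = n - 1 then st.1 ++ j
          else if 0 < st.2 then st.1 ++ j ++ t
          else st.1,
          st.2 + 1)) (acc, c)).1 = acc ++ PySem.Chars.join t ys := by
  intro ys
  induction ys with
  | nil => intro acc c _ _; simp [PySem.Chars.join_nil]
  | cons j ys' ih =>
    intro acc c hc hpos
    simp only [List.foldl_cons]
    cases ys' with
    | nil =>
      have h1 : c = n - 1 := by simp at hc; omega
      simp [h1, PySem.Chars.join_singleton]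
    | cons q qs =>
      have h1 : ¬ (c = n - 1) := by simp at hc; omega
      simp only [h1, if_false, hpos, if_true]
      rw [ih (acc ++ j ++ t) (c + 1) (by simp at hc ⊢; omega) (by omega)]
      rw [PySem.Chars.join_cons_cons]
      simp [List.append_assoc]

theorem quitarFold_eq (t : List Char) (x : List Char) (ys : List (List Char)) :
    quitarFold t (x :: ys) = if ys = [] then x else PySem.Chars.join t ys := by
  unfold quitarFold
  simp only [List.foldl_cons, List.length_cons]
  cases ys with
  | nil => simp
  | cons q qs =>
    have hne : (q :: qs : List (List Char)) ≠ [] := by simp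
    rw [if_neg (show ¬ ((0 : Int) = (((q :: qs).length + 1 : Nat) : Int) - 1) from by intro h; rw [List.length_cons] at h; push_cast at h; omega)]
    rw [if_neg (show ¬ ((0 : Int) < 0) from by norm_num)]
    rw [show ((0 : Int) + 1) = 1 from by norm_num]
    simpa [hne] using quitarFold_invariant t (((q :: qs).length + 1 : Nat) : Int) (q :: qs) [] 1 (by push_cast; ring) one_pos

-- ===== VERDICT (by name: the statement is the Claim_ definition above) =====
theorem quitar_spec : Claim_equal_quitar := by
  intro entrada token _ hpre
  unfold Spec_quitar quitar quitar_alt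
  have htok : token.toList ≠ [] := by
    intro h
    apply hpre
    have := congrArg String.ofList h
    simpa using this
  have hsplit : PySem.Chars.split? entrada.toList token.toList
      = some (PySem.Chars.splitOn entrada.toList token.toList) := by
    simp [PySem.Chars.split?, List.isEmpty_iff, htok]
  rw [hsplit]
  simp only [PySem.Str.find_eq]
  by_cases hf : PySem.Chars.find entrada.toList token.toList = -1
  · -- token does not occur: A returns the single part, B returns entrada
    have hni : ¬ token.toList <:+: entrada.toList :=
      (PySem.Chars.find_eq_neg_one_iff _ _).mp hf
    rw [splitOn_of_not_infix _ _ htok hni, quitarFold_eq]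
    simp [hf]
  · -- token occurs first at index i: A rejoins the tail parts, B slices after i + len(token)
    have hnn : 0 ≤ PySem.Chars.find entrada.toList token.toList := by
      have := PySem.Chars.neg_one_le_find entrada.toList token.toList
      omega
    obtain ⟨hpre', hmin⟩ := PySem.Chars.find_spec hnn
    set fi := PySem.Chars.find entrada.toList token.toList with hfi
    have hle : fi.toNat ≤ entrada.toList.length := by
      have := PySem.Chars.find_le_length entrada.toList token.toList
      omega
    rw [splitOn_first_occ token.toList htok fi.toNat entrada.toList hle hpre'
        (fun j hj => hmin j hj)]
    rw [quitarFold_eq]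
    have hne : PySem.Chars.splitOn (entrada.toList.drop (fi.toNat + token.toList.length)) token.toList ≠ [] := by
      rw [splitOn_eq_sp]
      exact sp_ne_nil _ _ _
    simp only [hne, if_false]
    have hjoin : PySem.Chars.join token.toList
        (PySem.Chars.splitOn (entrada.toList.drop (fi.toNat + token.toList.length)) token.toList)
        = entrada.toList.drop (fi.toNat + token.toList.length) := by
      rw [splitOn_eq_sp]
      exact join_sp token.toList htok _ _ (Nat.le_succ _)
    rw [hjoin]
    have hslice : PySem.List.slice entrada.toList (some (fi + (token.toList.length : Int))) none
        = entrada.toList.drop ((fi + (token.toList.length : Int)).toNat) := by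
      exact PySem.List.slice_from entrada.toList (by omega)
    simp only [hf, if_false]
    rw [hslice, show ((fi + (token.toList.length : Int)).toNat) = fi.toNat + token.toList.length by omega]
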